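-- pv_equiv track=rewrite | github.com/EnrycoWeiser/adventOfCode24 | Day4/AoC_Day4.py | search_diagonal_ne_sw
-- ===== SOURCE A (Python) =====
-- def search_diagonal_ne_sw(splitted):
--     count = 0
--     lines_number = len(splitted)
--
--     for row in range(lines_number):
--         if row >= (lines_number - 3):
--             continue
--         else:
--             for char in range(len(splitted[row])):
--                 if char <= 2:
--                     continue
--                 if splitted[row][char] == 'X' and splitted[row+1][char-1] == 'M' and splitted[row+2][char-2] == 'A' and splitted[row+3][char-3] == 'S' :
--                     count = count + 1
--     return count
-- ===== SOURCE B (Python) =====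
-- def search_diagonal_ne_sw(splitted):
--     # Build each NE-SW anti-diagonal (constant row+col) as a top-to-bottom list over the rows
--     # it can intersect, padding missing cells with None, then slide a 4-cell window looking for XMAS.
--     n = len(splitted)
--     maxlen = max(map(len, splitted), default=0)
--     total = 0
--     for d in range(n + maxlen - 3):
--         lo = max(d - maxlen + 1, 0)
--         hi = min(d + 1, n)
--         diag = [splitted[r][d - r] if 0 <= d - r < len(splitted[r]) else None
--                 for r in range(lo, hi)]
--         for i in range(len(diag) - 3):
--             if diag[i:i + 4] == ['X', 'M', 'A', 'S']:
--                 total += 1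
--     return total
-- ===== Notes on version B (the rewrite author's own statement) =====
-- stated objective: alternative
-- what changed: B groups cells by anti-diagonal (constant row+col), extracts each NE-SW diagonal top-to-bottom padded with None, and slides a 4-cell window over it, instead of A's per-cell anchored 4-character test inside nested row/column loops.
import Mathlib
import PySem

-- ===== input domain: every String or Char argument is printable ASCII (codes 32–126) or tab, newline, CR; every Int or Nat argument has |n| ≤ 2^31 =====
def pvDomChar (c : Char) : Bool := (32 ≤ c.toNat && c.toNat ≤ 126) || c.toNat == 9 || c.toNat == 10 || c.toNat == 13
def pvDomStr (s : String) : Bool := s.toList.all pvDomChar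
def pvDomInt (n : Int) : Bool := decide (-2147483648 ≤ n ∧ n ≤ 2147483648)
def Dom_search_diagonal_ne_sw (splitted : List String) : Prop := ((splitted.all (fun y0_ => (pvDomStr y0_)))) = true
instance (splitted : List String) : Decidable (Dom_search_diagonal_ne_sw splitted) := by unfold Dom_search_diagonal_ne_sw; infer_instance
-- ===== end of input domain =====

-- B extracts each NE-SW anti-diagonal (padded with none) and slides a 4-cell window over it,
-- instead of A's per-cell anchored 4-character test (objective: alternative decomposition, same cost class).


-- ===== PORT A =====
def search_diagonal_ne_sw (splitted : List String) : Int :=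
  let lines_number : Int := splitted.length
  (PySem.List.pyRange 0 lines_number).foldl (fun count row =>
    if row ≥ lines_number - 3 then count
    else
      (PySem.List.pyRange 0 (PySem.Str.len (PySem.List.pyGetD splitted row ""))).foldl
        (fun count char =>
          if char ≤ 2 then count
          else if (PySem.Str.pyGet? (PySem.List.pyGetD splitted row "") char == some 'X')
               && (PySem.Str.pyGet? (PySem.List.pyGetD splitted (row+1) "") (char-1) == some 'M')
               && (PySem.Str.pyGet? (PySem.List.pyGetD splitted (row+2) "") (char-2) == some 'A')
               && (PySem.Str.pyGet? (PySem.List.pyGetD splitted (row+3) "") (char-3) == some 'S')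
          then count + 1 else count) count) 0

-- ===== PORT B =====
def search_diagonal_ne_sw_alt (splitted : List String) : Int :=
  let n : Int := splitted.length
  let maxlen : Int := PySem.List.maxD (splitted.map (fun r => PySem.Str.len r)) (fun x => x) 0
  (PySem.List.pyRange 0 (n + maxlen - 3)).foldl (fun total d =>
    let lo : Int := max (d - maxlen + 1) 0
    let hi : Int := min (d + 1) n
    let diag : List (Option Char) := (PySem.List.pyRange lo hi).map (fun r =>
      if 0 ≤ d - r ∧ d - r < PySem.Str.len (PySem.List.pyGetD splitted r "")
      then PySem.Str.pyGet? (PySem.List.pyGetD splitted r "") (d - r) else none)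
    (PySem.List.pyRange 0 ((diag.length : Int) - 3)).foldl (fun total i =>
      if PySem.List.slice diag (some i) (some (i+4)) == [some 'X', some 'M', some 'A', some 'S']
      then total + 1 else total) total) 0

-- ===== PRECONDITION & SPEC =====
-- row r as a character list (out-of-range rows read as the empty row, matching Python's
-- guaranteed-in-range row accesses)
def pvRowOf (splitted : List String) (r : Nat) : List Char := (splitted.getD r "").toList

-- Pre_ excludes exactly the inputs on which A raises IndexError: ragged grids where the
-- short-circuited 'X'(,'M','A') chain indexes past the end of a shorter lower row.
def Pre_search_diagonal_ne_sw (splitted : List String) : Prop :=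
  ∀ r ∈ List.range splitted.length, r + 3 < splitted.length →
    ∀ c ∈ List.range (pvRowOf splitted r).length, 3 ≤ c →
      ((pvRowOf splitted r)[c]? = some 'X' →
        c - 1 < (pvRowOf splitted (r+1)).length ∧
        ((pvRowOf splitted (r+1))[c-1]? = some 'M' →
          c - 2 < (pvRowOf splitted (r+2)).length ∧
          ((pvRowOf splitted (r+2))[c-2]? = some 'A' →
            c - 3 < (pvRowOf splitted (r+3)).length)))
instance (splitted : List String) : Decidable (Pre_search_diagonal_ne_sw splitted) := by
  unfold Pre_search_diagonal_ne_sw; infer_instance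

def pvWitness_search_diagonal_ne_sw : List String := ["...X", "..M.", ".A..", "S..."]

def Spec_search_diagonal_ne_sw (splitted : List String) (out : Int) : Prop := out = search_diagonal_ne_sw_alt splitted
instance (splitted : List String) (out : Int) : Decidable (Spec_search_diagonal_ne_sw splitted out) := by unfold Spec_search_diagonal_ne_sw; infer_instance

-- ===== CLAIM (what is proved, stated in full; the proofs are below) =====
def Claim_equal_search_diagonal_ne_sw : Prop := ∀ (splitted : List String), Dom_search_diagonal_ne_sw splitted → Pre_search_diagonal_ne_sw splitted → Spec_search_diagonal_ne_sw splitted (search_diagonal_ne_sw splitted)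

-- ===== LEMMAS AND PROOFS =====

-- the cell at row r, column c (none = out of grid)
def pvCell (s : List String) (r c : Nat) : Option Char := (pvRowOf s r)[c]?

-- the anchored-match predicate both programs count: 'X' at (r,c) with 'M','A','S' on the
-- NE-SW diagonal below it, all four cells in the grid
def pvP (s : List String) (r c : Nat) : Bool :=
  (3 ≤ c) && (pvCell s r c == some 'X') && (pvCell s (r+1) (c-1) == some 'M')
  && (pvCell s (r+2) (c-2) == some 'A') && (pvCell s (r+3) (c-3) == some 'S')

def pvN (s : List String) : Nat := s.length
def pvMaxlenI (s : List String) : Int :=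
  PySem.List.maxD (s.map (fun r => PySem.Str.len r)) (fun x => x) 0
def pvM (s : List String) : Nat := (pvMaxlenI s).toNat

-- canonical count both ports are proved equal to
def pvT (s : List String) : Int :=
  ((List.range (pvN s)).map
    (fun r => ((List.range (pvM s)).countP (fun c => pvP s r c) : Int))).sum

lemma pvMaxlenI_nonneg (s : List String) : 0 ≤ pvMaxlenI s := by
  unfold pvMaxlenI PySem.List.maxD
  cases h : PySem.List.max? (s.map (fun r => PySem.Str.len r)) (fun x => x) with
  | none => simp
  | some m =>
    have hm := PySem.List.max?_mem h
    simp only [List.mem_map] at hm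
    obtain ⟨x, -, hx⟩ := hm
    simp [← hx, PySem.Str.len_eq]

lemma pvRow_le_pvM (s : List String) (r : Nat) (h : r < s.length) :
    (pvRowOf s r).length ≤ pvM s := by
  unfold pvM pvMaxlenI PySem.List.maxD
  cases hm : PySem.List.max? (s.map (fun r => PySem.Str.len r)) (fun x => x) with
  | none =>
    rw [PySem.List.max?_eq_none_iff] at hm
    simp only [List.map_eq_nil_iff] at hm
    simp [hm] at h
  | some m =>
    have hmax := PySem.List.max?_isMax hm (PySem.Str.len (s.getD r ""))
      (List.mem_map.mpr ⟨s.getD r "", by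
        rw [List.getD_eq_getElem s "" h]; exact List.getElem_mem h, rfl⟩)
    simp only [PySem.Str.len_eq] at hmax
    unfold pvRowOf
    simp only [Option.getD_some]
    omega

lemma pvP_col_lt (s : List String) {r c : Nat} (h : pvP s r c = true) (hr : r < s.length) :
    c < pvM s := by
  have hx : pvCell s r c = some 'X' := by
    simp only [pvP, Bool.and_eq_true, beq_iff_eq] at h; exact h.1.1.1.2
  unfold pvCell at hx
  rw [List.getElem?_eq_some_iff] at hx
  exact lt_of_lt_of_le hx.1 (pvRow_le_pvM s r hr)

lemma pvP_col_lt_row (s : List String) {r c : Nat} (h : pvP s r c = true) :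
    c < (pvRowOf s r).length := by
  have hx : pvCell s r c = some 'X' := by
    simp only [pvP, Bool.and_eq_true, beq_iff_eq] at h; exact h.1.1.1.2
  unfold pvCell at hx
  rw [List.getElem?_eq_some_iff] at hx
  exact hx.1

lemma pvP_row_lt (s : List String) {r c : Nat} (h : pvP s r c = true) :
    r + 3 < s.length := by
  have hs : pvCell s (r+3) (c-3) = some 'S' := by
    simp only [pvP, Bool.and_eq_true, beq_iff_eq] at h; exact h.2
  by_contra hcon
  unfold pvCell pvRowOf at hs
  rw [List.getD_eq_default _ _ (by omega)] at hs
  simp at hs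

lemma countP_range_mono (p : Nat → Bool) (a b : Nat) (hab : a ≤ b)
    (h : ∀ c, p c = true → c < a) :
    (List.range b).countP p = (List.range a).countP p := by
  induction b with
  | zero => interval_cases a; rfl
  | succ b ih =>
    rcases Nat.eq_or_lt_of_le hab with h1 | h1
    · rw [h1]
    · rw [List.range_succ, List.countP_append, ih (by omega)]
      have : p b = false := by
        cases hp : p b with
        | false => rfl
        | true => exact absurd (h b hp) (by omega)
      simp [this]

lemma countP_range_eq_sum (p : Nat → Bool) (m : Nat) :
    ((List.range m).countP p : Int) = ∑ x ∈ Finset.range m, (if p x then (1:Int) else 0) := by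
  induction m with
  | zero => simp
  | succ m ih => rw [List.range_succ, List.countP_append, Finset.sum_range_succ, ← ih]; simp

lemma sum_map_range_eq_sum (f : Nat → Int) (m : Nat) :
    ((List.range m).map f).sum = ∑ x ∈ Finset.range m, f x := by
  induction m with
  | zero => simp
  | succ m ih => rw [List.range_succ, Finset.sum_range_succ, ← ih]; simp

lemma lemA (s : List String) : search_diagonal_ne_sw s = pvT s := by
  simp only [search_diagonal_ne_sw]
  rw [PySem.List.pyRange_one]
  simp only [zero_add, sub_zero, Int.toNat_natCast, List.foldl_map]
  have hbody : ∀ (count : Int) (r : Nat),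
      (if (r : Int) ≥ (s.length : Int) - 3 then count
       else
        List.foldl
          (fun count char =>
            if char ≤ 2 then count
            else
              if (PySem.Str.pyGet? (PySem.List.pyGetD s (r:Int) "") char == some 'X' &&
                    PySem.Str.pyGet? (PySem.List.pyGetD s ((r:Int) + 1) "") (char - 1) == some 'M' &&
                  PySem.Str.pyGet? (PySem.List.pyGetD s ((r:Int) + 2) "") (char - 2) == some 'A' &&
                PySem.Str.pyGet? (PySem.List.pyGetD s ((r:Int) + 3) "") (char - 3) == some 'S') = true
              then count + 1 else count)
          count (PySem.List.pyRange 0 (PySem.Str.len (PySem.List.pyGetD s (r:Int) ""))))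
      = count + (if (r : Int) ≥ (s.length : Int) - 3 then 0
          else ((List.range (pvRowOf s r).length).countP (fun c => pvP s r c) : Int)) := by
    intro count r
    split_ifs with hge
    · simp
    · have hr3 : r + 3 < s.length := by omega
      have e1 : ((r:Int)+1) = ((r+1:Nat):Int) := by omega
      have e2 : ((r:Int)+2) = ((r+2:Nat):Int) := by omega
      have e3 : ((r:Int)+3) = ((r+3:Nat):Int) := by omega
      rw [e1, e2, e3]
      simp only [PySem.List.pyGetD_natCast, PySem.Str.len_eq]
      rw [PySem.List.pyRange_one]
      simp only [zero_add, sub_zero, Int.toNat_natCast, List.foldl_map]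
      have hinner : ∀ (count : Int) (c : Nat),
          (if (c:Int) ≤ 2 then count
           else
            if (PySem.Str.pyGet? (s.getD r "") (c:Int) == some 'X' &&
                  PySem.Str.pyGet? (s.getD (r+1) "") ((c:Int) - 1) == some 'M' &&
                PySem.Str.pyGet? (s.getD (r+2) "") ((c:Int) - 2) == some 'A' &&
              PySem.Str.pyGet? (s.getD (r+3) "") ((c:Int) - 3) == some 'S') = true
            then count + 1 else count)
          = if pvP s r c then count + 1 else count := by
        intro count c
        by_cases h2 : c ≤ 2
        · have hp : pvP s r c = false := by
            unfold pvP; simp [show ¬ 3 ≤ c by omega]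
          rw [if_pos (by exact_mod_cast Nat.cast_le.mpr h2), hp]
          simp
        · have f1 : ((c:Int) - 1) = ((c-1:Nat):Int) := by omega
          have f2 : ((c:Int) - 2) = ((c-2:Nat):Int) := by omega
          have f3 : ((c:Int) - 3) = ((c-3:Nat):Int) := by omega
          rw [if_neg (by omega), f1, f2, f3]
          simp only [PySem.Str.pyGet?_natCast]
          unfold pvP pvCell pvRowOf
          simp [show 3 ≤ c by omega]
      simp only [hinner]
      rw [PySem.List.foldl_count_if]
      unfold pvRowOf
      rfl
  simp only [hbody]
  rw [PySem.List.foldl_add, zero_add]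
  unfold pvT pvN
  apply congrArg List.sum
  apply List.map_congr_left
  intro r hr
  rw [List.mem_range] at hr
  split_ifs with hge
  · symm
    norm_cast
    rw [List.countP_eq_zero]
    intro c _ hp
    have := pvP_row_lt s (by simpa using hp)
    omega
  · norm_cast
    exact (countP_range_mono (fun c => pvP s r c) (pvRowOf s r).length (pvM s)
      (pvRow_le_pvM s r hr) (fun c hc => pvP_col_lt_row s hc)).symm

-- one diagonal entry read as an option, compared with pvCell
lemma pvG_eq_some (s : List String) (dN r : Nat) (ch : Char) :
    ((if 0 ≤ (dN:Int) - ↑r ∧ (dN:Int) - ↑r < PySem.Str.len (PySem.List.pyGetD s ↑r "")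
      then PySem.Str.pyGet? (PySem.List.pyGetD s ↑r "") ((dN:Int) - ↑r) else none) = some ch)
    ↔ (r ≤ dN ∧ pvCell s r (dN - r) = some ch) := by
  simp only [PySem.List.pyGetD_natCast, PySem.Str.len_eq]
  by_cases hr : r ≤ dN
  · have e : (dN:Int) - ↑r = ((dN - r : Nat) : Int) := by omega
    rw [e]
    by_cases hlt : dN - r < (s.getD r "").toList.length
    · rw [if_pos ⟨by omega, by exact_mod_cast hlt⟩]
      simp only [PySem.Str.pyGet?_natCast]
      unfold pvCell pvRowOf
      simp [hr]
    · rw [if_neg (by rintro ⟨-, h⟩; omega)]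
      unfold pvCell pvRowOf
      rw [List.getElem?_eq_none (by omega)]
      simp [hr]
  · rw [if_neg (by rintro ⟨h0, -⟩; omega)]
    simp [hr]

-- window bounds of anti-diagonal dN: rows pvLo..pvHi-1 are the ones B scans
def pvLo (s : List String) (dN : Nat) : Nat := dN + 1 - pvM s
def pvHi (s : List String) (dN : Nat) : Nat := min (dN + 1) s.length
def pvLen (s : List String) (dN : Nat) : Nat := pvHi s dN - pvLo s dN

lemma pvLo_cast (s : List String) (dN : Nat) :
    max ((dN:Int) - ↑(pvM s) + 1) 0 = ↑(pvLo s dN) := by unfold pvLo; omega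

lemma pvLen_cast (s : List String) (dN : Nat) :
    (min ((dN:Int) + 1) ↑s.length - ↑(pvLo s dN)).toNat = pvLen s dN := by
  unfold pvLen pvHi pvLo; omega

lemma pvP_guard (s : List String) {r c : Nat} (h : pvP s r c = true) : 3 ≤ c := by
  simp only [pvP, Bool.and_eq_true, decide_eq_true_eq] at h
  exact h.1.1.1.1

-- the window test B performs at offset i inside the scanned part of anti-diagonal dN
def pvQ (s : List String) (dN i : Nat) : Bool :=
  PySem.List.slice
    (List.map ((fun (r : Int) =>
        if 0 ≤ (dN:Int) - r ∧ (dN:Int) - r < PySem.Str.len (PySem.List.pyGetD s r "")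
        then PySem.Str.pyGet? (PySem.List.pyGetD s r "") ((dN:Int) - r) else none) ∘
        (fun (k : Nat) => max ((dN:Int) - ↑(pvM s) + 1) 0 + (k : Int)))
      (List.range (min ((dN:Int) + 1) ↑s.length - max ((dN:Int) - ↑(pvM s) + 1) 0).toNat))
    (some (i:Int)) (some ((i:Int) + 4)) == [some 'X', some 'M', some 'A', some 'S']

lemma pvQ_eq (s : List String) (dN i : Nat) :
    pvQ s dN i = pvP s (pvLo s dN + i) (dN - (pvLo s dN + i)) := by
  unfold pvQ
  rw [pvLo_cast, pvLen_cast]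
  have e4 : ((i:Int) + 4) = ((i + 4 : Nat) : Int) := by omega
  rw [e4, PySem.List.slice_natCast]
  have hmap : ∀ (m : Nat), List.map ((fun (r : Int) =>
      if 0 ≤ (dN:Int) - r ∧ (dN:Int) - r < PySem.Str.len (PySem.List.pyGetD s r "")
      then PySem.Str.pyGet? (PySem.List.pyGetD s r "") ((dN:Int) - r) else none) ∘
      (fun (k : Nat) => ((pvLo s dN : Nat) : Int) + (k : Int))) (List.range m)
      = List.map (fun (k : Nat) =>
      if 0 ≤ (dN:Int) - ↑(pvLo s dN + k) ∧
          (dN:Int) - ↑(pvLo s dN + k) < PySem.Str.len (PySem.List.pyGetD s ↑(pvLo s dN + k) "")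
      then PySem.Str.pyGet? (PySem.List.pyGetD s ↑(pvLo s dN + k) "") ((dN:Int) - ↑(pvLo s dN + k))
      else none) (List.range m) := by
    intro m
    apply List.map_congr_left
    intro k _
    have : ((pvLo s dN : Nat) : Int) + (k : Int) = ((pvLo s dN + k : Nat) : Int) := by omega
    simp only [Function.comp_apply, this]
  rw [hmap]
  by_cases hi3 : i + 3 < pvLen s dN
  · rw [List.drop_eq_getElem_cons (by simp; omega), List.drop_eq_getElem_cons (by simp; omega),
        List.drop_eq_getElem_cons (by simp; omega), List.drop_eq_getElem_cons (by simp; omega)]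
    simp only [List.getElem_map, List.getElem_range,
      show i + 4 - i = 4 from by omega]
    rw [List.take_succ_cons, List.take_succ_cons, List.take_succ_cons, List.take_succ_cons,
        List.take_zero]
    rw [Bool.eq_iff_iff]
    simp only [beq_iff_eq, List.cons.injEq, and_true]
    rw [pvG_eq_some, pvG_eq_some, pvG_eq_some, pvG_eq_some]
    simp only [pvP, Bool.and_eq_true, beq_iff_eq, decide_eq_true_eq]
    set r0 := pvLo s dN + i with hr0
    constructor
    · rintro ⟨⟨hi, hX⟩, ⟨h1, hM⟩, ⟨h2, hA⟩, ⟨h3, hS⟩⟩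
      rw [show pvLo s dN + (i + 1) = r0 + 1 from by omega] at hM
      rw [show pvLo s dN + (i + 2) = r0 + 2 from by omega] at hA
      rw [show pvLo s dN + (i + 3) = r0 + 3 from by omega] at hS
      have h3' : r0 + 3 ≤ dN := by omega
      refine ⟨⟨⟨⟨by omega, hX⟩, ?_⟩, ?_⟩, ?_⟩
      · rw [show dN - r0 - 1 = dN - (r0 + 1) from by omega]; exact hM
      · rw [show dN - r0 - 2 = dN - (r0 + 2) from by omega]; exact hA
      · rw [show dN - r0 - 3 = dN - (r0 + 3) from by omega]; exact hS
    · rintro ⟨⟨⟨⟨hg, hX⟩, hM⟩, hA⟩, hS⟩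
      have hr : r0 ≤ dN := by
        by_contra hcon
        rw [Nat.sub_eq_zero_of_le (by omega)] at hg; omega
      refine ⟨⟨hr, hX⟩, ⟨by omega, ?_⟩, ⟨by omega, ?_⟩, ⟨by omega, ?_⟩⟩
      · rw [show pvLo s dN + (i + 1) = r0 + 1 from by omega,
            show dN - (r0 + 1) = dN - r0 - 1 from by omega]; exact hM
      · rw [show pvLo s dN + (i + 2) = r0 + 2 from by omega,
            show dN - (r0 + 2) = dN - r0 - 2 from by omega]; exact hA
      · rw [show pvLo s dN + (i + 3) = r0 + 3 from by omega,
            show dN - (r0 + 3) = dN - r0 - 3 from by omega]; exact hS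
  · have hp : pvP s (pvLo s dN + i) (dN - (pvLo s dN + i)) = false := by
      cases h : pvP s (pvLo s dN + i) (dN - (pvLo s dN + i)) with
      | false => rfl
      | true =>
        exfalso
        have hrow := pvP_row_lt s h
        have hguard := pvP_guard s h
        have hr : pvLo s dN + i ≤ dN := by
          by_contra hcon
          rw [Nat.sub_eq_zero_of_le (by omega)] at hguard; omega
        have hlo : pvLo s dN = dN + 1 - pvM s := rfl
        have hhi : pvHi s dN = min (dN + 1) s.length := rfl
        have hlen : pvLen s dN = pvHi s dN - pvLo s dN := rfl
        omega
    rw [hp]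
    apply beq_eq_false_iff_ne.mpr
    intro hEq
    have := congrArg List.length hEq
    simp only [List.length_take, List.length_drop, List.length_map, List.length_range,
      List.length_cons, List.length_nil] at this
    omega

lemma sum_shift2 (e : Nat → Int) (lo W N : Nat)
    (hb : ∀ r, e r ≠ 0 → lo ≤ r ∧ r - lo < W ∧ r < N) :
    ∑ i ∈ Finset.range W, e (lo + i) = ∑ r ∈ Finset.range N, e r := by
  rw [← Finset.sum_filter_ne_zero (Finset.range W)]
  rw [← Finset.sum_filter_ne_zero (Finset.range N)]
  apply Finset.sum_nbij' (fun i => lo + i) (fun r => r - lo)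
  · intro a ha
    simp only [Finset.mem_filter, Finset.mem_range] at *
    exact ⟨(hb _ ha.2).2.2, ha.2⟩
  · intro a ha
    simp only [Finset.mem_filter, Finset.mem_range] at *
    obtain ⟨h1, h2, h3⟩ := hb _ ha.2
    refine ⟨h2, ?_⟩
    rw [Nat.add_sub_cancel' h1]
    exact ha.2
  · intro a ha; omega
  · intro a ha
    simp only [Finset.mem_filter, Finset.mem_range] at ha
    have := (hb _ ha.2).1
    omega
  · intro a ha; rfl

lemma sum_shift (e : Nat → Int) (i DN MN : Nat) (h0 : e 0 = 0)
    (hb : ∀ c, e c ≠ 0 → c < MN ∧ i + c < DN) :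
    ∑ d ∈ Finset.range DN, e (d - i) = ∑ c ∈ Finset.range MN, e c := by
  rw [← Finset.sum_filter_ne_zero (Finset.range DN)]
  rw [← Finset.sum_filter_ne_zero (Finset.range MN)]
  apply Finset.sum_nbij' (fun d => d - i) (fun c => c + i)
  · intro a ha
    simp only [Finset.mem_filter, Finset.mem_range] at *
    exact ⟨(hb _ ha.2).1, ha.2⟩
  · intro a ha
    simp only [Finset.mem_filter, Finset.mem_range] at *
    refine ⟨by have := (hb _ ha.2).2; omega, ?_⟩
    simpa using ha.2
  · intro a ha
    simp only [Finset.mem_filter, Finset.mem_range] at ha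
    have : ¬ (a < i) := fun hlt => ha.2 (by simpa [Nat.sub_eq_zero_of_le (le_of_lt hlt)] using h0)
    omega
  · intro a ha
    omega
  · intro a ha
    rfl

lemma lemB (s : List String) : search_diagonal_ne_sw_alt s = pvT s := by
  simp only [search_diagonal_ne_sw_alt]
  have hM : PySem.List.maxD (s.map (fun r => PySem.Str.len r)) (fun x => x) 0 = ((pvM s : Nat) : Int) := by
    unfold pvM; rw [Int.toNat_of_nonneg (pvMaxlenI_nonneg s)]; rfl
  rw [hM]
  simp only [PySem.List.pyRange_one, zero_add, sub_zero, List.foldl_map,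
    List.map_map, List.length_map, List.length_range]
  show List.foldl (fun x y =>
      List.foldl (fun x y_1 => if pvQ s y y_1 = true then x + 1 else x) x
        (List.range ((((min ((y:Int) + 1) ↑s.length - max ((y:Int) - ↑(pvM s) + 1) 0).toNat : Nat)
          : Int) - 3).toNat))
      0 (List.range ((s.length : Int) + (pvM s : Int) - 3).toNat) = pvT s
  simp only [pvQ_eq]
  have eW : ∀ dN : Nat, ((((min ((dN:Int) + 1) ↑s.length - max ((dN:Int) - ↑(pvM s) + 1) 0).toNat
      : Nat) : Int) - 3).toNat = pvLen s dN - 3 := by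
    intro dN
    rw [pvLo_cast, pvLen_cast]
    omega
  simp only [eW]
  simp only [PySem.List.foldl_count_if]
  rw [PySem.List.foldl_add, zero_add, sum_map_range_eq_sum]
  unfold pvT pvN
  rw [sum_map_range_eq_sum]
  simp only [countP_range_eq_sum]
  have hrow : ∀ dN : Nat, (∑ i ∈ Finset.range (pvLen s dN - 3),
      (if pvP s (pvLo s dN + i) (dN - (pvLo s dN + i)) = true then (1:Int) else 0))
      = ∑ r ∈ Finset.range s.length, (if pvP s r (dN - r) = true then (1:Int) else 0) := by
    intro dN
    refine sum_shift2 (fun r => if pvP s r (dN - r) = true then (1:Int) else 0)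
      (pvLo s dN) _ _ ?_
    intro r hr
    have hp : pvP s r (dN - r) = true := by
      by_contra h
      simp [Bool.eq_false_iff.mpr h] at hr
    have hrow3 := pvP_row_lt s hp
    have hg := pvP_guard s hp
    have hcl := pvP_col_lt_row s hp
    have hcM : dN - r < pvM s := lt_of_lt_of_le hcl (pvRow_le_pvM s r (by omega))
    have hrd : r ≤ dN := by
      by_contra hcon
      rw [Nat.sub_eq_zero_of_le (by omega)] at hg; omega
    have hlo : pvLo s dN = dN + 1 - pvM s := rfl
    have hhi : pvHi s dN = min (dN + 1) s.length := rfl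
    have hlen : pvLen s dN = pvHi s dN - pvLo s dN := rfl
    exact ⟨by omega, by omega, by omega⟩
  simp only [hrow]
  rw [Finset.sum_comm]
  apply Finset.sum_congr rfl
  intro i hi
  rw [Finset.mem_range] at hi
  refine sum_shift (fun c => if pvP s i c = true then (1:Int) else 0) i _ _ ?_ ?_
  · simp [pvP]
  · intro c hc
    have hp : pvP s i c = true := by
      by_contra h
      simp [Bool.eq_false_iff.mpr h] at hc
    refine ⟨pvP_col_lt s hp hi, ?_⟩
    have h3 := pvP_row_lt s hp
    have hcM := pvP_col_lt s hp hi
    omega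

-- ===== VERDICT (by name: the statement is the Claim_ definition above) =====
theorem search_diagonal_ne_sw_spec : Claim_equal_search_diagonal_ne_sw := by
  intro s _ _
  unfold Spec_search_diagonal_ne_sw
  rw [lemA, lemB]
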